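-- pv_equiv track=rewrite | github.com/nitin001singh/Data-Structure---Algorithm | Two Pointers/Program5.py | answer
-- ===== SOURCE A (Python) =====
-- def answer(nums, k):
--     left = 0
--     maxLength = 0
--
--     for right in range(len(nums)):
--         current_window = nums[left:right+1]
--         while max(current_window) - min(current_window) > k:
--             left += 1
--             current_window = nums[left:right+1]
--
--         maxLength = max(maxLength, right - left + 1)
--
--     return maxLength
-- ===== SOURCE B (Python) =====
-- def answer(nums, k):
--     best = 0
--     for r in range(len(nums)):
--         hi = nums[r]
--         lo = nums[r]
--         l = r
--         while l > 0:
--             v = nums[l - 1]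
--             nh = hi if hi >= v else v
--             nl = lo if lo <= v else v
--             if nh - nl > k:
--                 break
--             hi = nh
--             lo = nl
--             l -= 1
--         best = max(best, r - l + 1)
--     return best
-- ===== Notes on version B (the rewrite author's own statement) =====
-- stated objective: alternative
-- what changed: Replaces A's carried two-pointer with repeated max()/min() over fresh slices by a per-index backward extension that grows the window leftward with a running max/min and an early break, no slicing and no carried state between iterations.
import Mathlib
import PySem

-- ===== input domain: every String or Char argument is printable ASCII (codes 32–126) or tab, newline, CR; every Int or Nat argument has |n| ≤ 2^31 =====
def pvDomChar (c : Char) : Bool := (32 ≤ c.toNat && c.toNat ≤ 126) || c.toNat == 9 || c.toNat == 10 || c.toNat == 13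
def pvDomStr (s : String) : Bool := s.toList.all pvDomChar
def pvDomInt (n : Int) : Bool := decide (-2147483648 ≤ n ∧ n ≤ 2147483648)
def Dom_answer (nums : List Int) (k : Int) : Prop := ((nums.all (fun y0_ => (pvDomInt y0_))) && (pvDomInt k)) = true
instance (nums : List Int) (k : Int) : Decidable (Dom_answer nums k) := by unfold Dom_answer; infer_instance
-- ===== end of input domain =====

-- B replaces A's carried two-pointer (which recomputes max()/min() over a fresh slice) by a
-- per-index backward window extension with a running max/min; alternative algorithm, return value proved equal on Pre_.

-- ===== PORT A =====
-- while-loop of A: advance `left` while max(window) - min(window) > k; the window is nums[left:right+1].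
def aWhile (nums : List Int) (k : Int) (right : Nat) (left : Nat) : Nat :=
  let cw := PySem.List.slice nums (some (left : Int)) (some ((right : Int) + 1))
  match h : PySem.List.max? cw (fun y => y), PySem.List.min? cw (fun y => y) with
  | some M, some m =>
      if M - m > k then aWhile nums k right (left + 1) else left
  | _, _ => left  -- empty window: Python's max([]) raises ValueError; excluded by Pre_answer
termination_by right + 1 - left
decreasing_by
  have hne : cw ≠ [] := by
    intro he; rw [he] at h; simp [PySem.List.max?] at h
  have hlen : 0 < cw.length := List.length_pos_iff.mpr hne
  have hcw : cw = (nums.drop left).take (right + 1 - left) := by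
    show PySem.List.slice _ _ _ = _
    have hc : ((right : Int) + 1) = ((right + 1 : Nat) : Int) := by push_cast; ring
    rw [hc, PySem.List.slice_natCast]
  rw [hcw] at hlen
  simp [List.length_take, List.length_drop] at hlen
  omega

def answer (nums : List Int) (k : Int) : Int :=
  ((List.range nums.length).foldl (fun (st : Nat × Int) right =>
      let lft := aWhile nums k right st.1
      (lft, max st.2 ((right : Int) - (lft : Int) + 1))) (0, 0)).2

-- ===== PORT B =====
-- inner while of B: extend the window leftward from index l while the running spread stays ≤ k.
def bGrow (nums : List Int) (k : Int) : Nat → Int → Int → Nat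
  | 0, _, _ => 0
  | l + 1, hi, lo =>
      match PySem.List.pyGet? nums (l : Int) with
      | some v =>
          let nh := if hi ≥ v then hi else v
          let nl := if lo ≤ v then lo else v
          if nh - nl > k then l + 1 else bGrow nums k l nh nl
      | none => l + 1  -- unreachable: the index is always in range here

def answer_alt (nums : List Int) (k : Int) : Int :=
  (List.range nums.length).foldl (fun (best : Int) (r : Nat) =>
      match PySem.List.pyGet? nums (r : Int) with
      | some x => max best ((r : Int) - (bGrow nums k r x x : Int) + 1)
      | none => best) 0  -- none unreachable: r < len(nums)

-- ===== PRECONDITION & SPEC =====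
-- Pre_ excludes nonempty nums with k < 0: there A's while-loop empties the window and max([]) raises ValueError.
def Pre_answer (nums : List Int) (k : Int) : Prop := nums = [] ∨ 0 ≤ k
instance (nums : List Int) (k : Int) : Decidable (Pre_answer nums k) := by unfold Pre_answer; infer_instance
def pvWitness_answer : List Int × Int := ([1, 3, 2], 1)

def Spec_answer (nums : List Int) (k : Int) (out : Int) : Prop := out = answer_alt nums k
instance (nums : List Int) (k : Int) (out : Int) : Decidable (Spec_answer nums k out) := by unfold Spec_answer; infer_instance

-- ===== CLAIM (what is proved, stated in full; the proofs are below) =====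
def Claim_equal_answer : Prop := ∀ (nums : List Int) (k : Int), Dom_answer nums k → Pre_answer nums k → Spec_answer nums k (answer nums k)

-- ===== LEMMAS AND PROOFS =====

-- maximum of nums[l..r] (inclusive), by recursion on the left index
def vmax (nums : List Int) (l r : Nat) : Int :=
  if l < r then max (nums.getD l 0) (vmax nums (l + 1) r) else nums.getD l 0
termination_by r - l

def vmin (nums : List Int) (l r : Nat) : Int :=
  if l < r then min (nums.getD l 0) (vmin nums (l + 1) r) else nums.getD l 0
termination_by r - l

-- least l with l ≤ r and spread(nums[l..r]) ≤ k (r+1 if none)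
def mL (nums : List Int) (k : Int) (r : Nat) : Nat :=
  Nat.find (p := fun l => (l ≤ r ∧ vmax nums l r - vmin nums l r ≤ k) ∨ l = r + 1) ⟨r + 1, Or.inr rfl⟩

lemma vmax_eq_of_not_lt (nums : List Int) {l r : Nat} (h : ¬ l < r) :
    vmax nums l r = nums.getD l 0 := by rw [vmax]; simp [h]

lemma vmin_eq_of_not_lt (nums : List Int) {l r : Nat} (h : ¬ l < r) :
    vmin nums l r = nums.getD l 0 := by rw [vmin]; simp [h]

lemma vmax_eq_of_lt (nums : List Int) {l r : Nat} (h : l < r) :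
    vmax nums l r = max (nums.getD l 0) (vmax nums (l + 1) r) := by rw [vmax]; simp [h]

lemma vmin_eq_of_lt (nums : List Int) {l r : Nat} (h : l < r) :
    vmin nums l r = min (nums.getD l 0) (vmin nums (l + 1) r) := by rw [vmin]; simp [h]

lemma mL_le_of_ok (nums : List Int) (k : Int) {l r : Nat} (hl : l ≤ r)
    (hok : vmax nums l r - vmin nums l r ≤ k) : mL nums k r ≤ l :=
  Nat.find_min' _ (Or.inl ⟨hl, hok⟩)

lemma mL_le (nums : List Int) (k : Int) (hk : 0 ≤ k) (r : Nat) : mL nums k r ≤ r := by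
  apply mL_le_of_ok nums k (le_refl r)
  rw [vmax_eq_of_not_lt nums (lt_irrefl r), vmin_eq_of_not_lt nums (lt_irrefl r)]
  omega

lemma mL_ok (nums : List Int) (k : Int) (hk : 0 ≤ k) (r : Nat) :
    vmax nums (mL nums k r) r - vmin nums (mL nums k r) r ≤ k := by
  have h := Nat.find_spec (p := fun l => (l ≤ r ∧ vmax nums l r - vmin nums l r ≤ k) ∨ l = r + 1) ⟨r + 1, Or.inr rfl⟩
  rcases h with ⟨_, h⟩ | h
  · exact h
  · exfalso; have hle := mL_le nums k hk r; unfold mL at hle; omega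

lemma mL_not_ok (nums : List Int) (k : Int) {l r : Nat} (hl : l ≤ r) (hlt : l < mL nums k r) :
    ¬ vmax nums l r - vmin nums l r ≤ k := by
  have h := Nat.find_min (p := fun l => (l ≤ r ∧ vmax nums l r - vmin nums l r ≤ k) ∨ l = r + 1) ⟨r + 1, Or.inr rfl⟩ hlt
  intro hok; exact h (Or.inl ⟨hl, hok⟩)

-- spreads only grow when the window is extended to the right
lemma vmax_r_mono (nums : List Int) :
    ∀ d l r : Nat, r - l ≤ d → l ≤ r → vmax nums l r ≤ vmax nums l (r + 1) := by
  intro d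
  induction d with
  | zero =>
      intro l r hd hlr
      have hlr' : l = r := by omega
      subst hlr'
      rw [vmax_eq_of_not_lt nums (lt_irrefl l), vmax_eq_of_lt nums (Nat.lt_succ_self l)]
      exact le_max_left _ _
  | succ d ih =>
      intro l r hd hlr
      by_cases h : l < r
      · rw [vmax_eq_of_lt nums h, vmax_eq_of_lt nums (by omega : l < r + 1)]
        exact max_le_max (le_refl _) (ih (l + 1) r (by omega) h)
      · have hlr' : l = r := by omega
        subst hlr'
        rw [vmax_eq_of_not_lt nums (lt_irrefl l), vmax_eq_of_lt nums (Nat.lt_succ_self l)]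
        exact le_max_left _ _

lemma vmin_r_mono (nums : List Int) :
    ∀ d l r : Nat, r - l ≤ d → l ≤ r → vmin nums l (r + 1) ≤ vmin nums l r := by
  intro d
  induction d with
  | zero =>
      intro l r hd hlr
      have hlr' : l = r := by omega
      subst hlr'
      rw [vmin_eq_of_not_lt nums (lt_irrefl l), vmin_eq_of_lt nums (Nat.lt_succ_self l)]
      exact min_le_left _ _
  | succ d ih =>
      intro l r hd hlr
      by_cases h : l < r
      · rw [vmin_eq_of_lt nums h, vmin_eq_of_lt nums (by omega : l < r + 1)]
        exact min_le_min (le_refl _) (ih (l + 1) r (by omega) h)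
      · have hlr' : l = r := by omega
        subst hlr'
        rw [vmin_eq_of_not_lt nums (lt_irrefl l), vmin_eq_of_lt nums (Nat.lt_succ_self l)]
        exact min_le_left _ _

lemma mL_mono (nums : List Int) (k : Int) (hk : 0 ≤ k) (r : Nat) :
    mL nums k r ≤ mL nums k (r + 1) := by
  by_cases h : mL nums k (r + 1) ≤ r
  · apply mL_le_of_ok nums k h
    have h1 := mL_ok nums k hk (r + 1)
    have h2 := vmax_r_mono nums (r - mL nums k (r + 1)) _ r (le_refl _) h
    have h3 := vmin_r_mono nums (r - mL nums k (r + 1)) _ r (le_refl _) h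
    omega
  · have := mL_le nums k hk r; omega

lemma win_cons (nums : List Int) {l r : Nat} (hl : l ≤ r) (hr : r < nums.length) :
    (nums.drop l).take (r + 1 - l) = nums.getD l 0 :: (nums.drop (l + 1)).take (r - l) := by
  have hln : l < nums.length := by omega
  rw [List.drop_eq_getElem_cons hln]
  have h1 : r + 1 - l = (r - l) + 1 := by omega
  rw [h1, List.take_succ_cons, List.getD_eq_getElem nums 0 hln]

-- spreads only shrink when the window is shrunk from the left
lemma vmax_l_anti (nums : List Int) :
    ∀ d l l' r : Nat, l' - l ≤ d → l ≤ l' → l' ≤ r → vmax nums l' r ≤ vmax nums l r := by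
  intro d
  induction d with
  | zero =>
      intro l l' r hd hll hlr
      have : l = l' := by omega
      subst this; exact le_refl _
  | succ d ih =>
      intro l l' r hd hll hlr
      by_cases h : l < l'
      · have h1 : vmax nums l' r ≤ vmax nums (l + 1) r := ih (l + 1) l' r (by omega) h hlr
        have h2 : vmax nums (l + 1) r ≤ vmax nums l r := by
          rw [vmax_eq_of_lt nums (by omega : l < r)]
          exact le_max_right _ _
        exact le_trans h1 h2
      · have : l = l' := by omega
        subst this; exact le_refl _

lemma vmin_l_anti (nums : List Int) :
    ∀ d l l' r : Nat, l' - l ≤ d → l ≤ l' → l' ≤ r → vmin nums l r ≤ vmin nums l' r := by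
  intro d
  induction d with
  | zero =>
      intro l l' r hd hll hlr
      have : l = l' := by omega
      subst this; exact le_refl _
  | succ d ih =>
      intro l l' r hd hll hlr
      by_cases h : l < l'
      · have h1 : vmin nums (l + 1) r ≤ vmin nums l' r := ih (l + 1) l' r (by omega) h hlr
        have h2 : vmin nums l r ≤ vmin nums (l + 1) r := by
          rw [vmin_eq_of_lt nums (by omega : l < r)]
          exact min_le_right _ _
        exact le_trans h2 h1
      · have : l = l' := by omega
        subst this; exact le_refl _

-- folding max over the window equals vmax
lemma foldl_max_win (nums : List Int) :
    ∀ d l r : Nat, r - l ≤ d → l ≤ r → r < nums.length →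
      ∀ a : Int, ((nums.drop l).take (r + 1 - l)).foldl max a = max a (vmax nums l r) := by
  intro d
  induction d with
  | zero =>
      intro l r hd hlr hr a
      have hlr' : l = r := by omega
      subst hlr'
      rw [win_cons nums (le_refl l) hr]
      simp [vmax_eq_of_not_lt nums (lt_irrefl l)]
  | succ d ih =>
      intro l r hd hlr hr a
      by_cases h : l < r
      · rw [win_cons nums hlr hr]
        have ht : r - l = r + 1 - (l + 1) := by omega
        rw [List.foldl_cons, ht, ih (l + 1) r (by omega) h hr (max a (nums.getD l 0))]
        rw [vmax_eq_of_lt nums h, max_assoc]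
      · have hlr' : l = r := by omega
        subst hlr'
        rw [win_cons nums (le_refl l) hr]
        simp [vmax_eq_of_not_lt nums (lt_irrefl l)]

lemma foldl_min_win (nums : List Int) :
    ∀ d l r : Nat, r - l ≤ d → l ≤ r → r < nums.length →
      ∀ a : Int, ((nums.drop l).take (r + 1 - l)).foldl min a = min a (vmin nums l r) := by
  intro d
  induction d with
  | zero =>
      intro l r hd hlr hr a
      have hlr' : l = r := by omega
      subst hlr'
      rw [win_cons nums (le_refl l) hr]
      simp [vmin_eq_of_not_lt nums (lt_irrefl l)]
  | succ d ih =>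
      intro l r hd hlr hr a
      by_cases h : l < r
      · rw [win_cons nums hlr hr]
        have ht : r - l = r + 1 - (l + 1) := by omega
        rw [List.foldl_cons, ht, ih (l + 1) r (by omega) h hr (min a (nums.getD l 0))]
        rw [vmin_eq_of_lt nums h, min_assoc]
      · have hlr' : l = r := by omega
        subst hlr'
        rw [win_cons nums (le_refl l) hr]
        simp [vmin_eq_of_not_lt nums (lt_irrefl l)]

lemma max?_win (nums : List Int) {l r : Nat} (hl : l ≤ r) (hr : r < nums.length) :
    PySem.List.max? ((nums.drop l).take (r + 1 - l)) (fun y => y) = some (vmax nums l r) := by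
  rw [win_cons nums hl hr, PySem.List.max?_id_cons]
  by_cases h : l < r
  · have ht : r - l = r + 1 - (l + 1) := by omega
    rw [ht, foldl_max_win nums (r - (l + 1)) (l + 1) r (le_refl _) h hr (nums.getD l 0)]
    rw [vmax_eq_of_lt nums h]
  · have hlr' : l = r := by omega
    subst hlr'
    simp [vmax_eq_of_not_lt nums (lt_irrefl l)]

lemma min?_win (nums : List Int) {l r : Nat} (hl : l ≤ r) (hr : r < nums.length) :
    PySem.List.min? ((nums.drop l).take (r + 1 - l)) (fun y => y) = some (vmin nums l r) := by
  rw [win_cons nums hl hr, PySem.List.min?_id_cons]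
  by_cases h : l < r
  · have ht : r - l = r + 1 - (l + 1) := by omega
    rw [ht, foldl_min_win nums (r - (l + 1)) (l + 1) r (le_refl _) h hr (nums.getD l 0)]
    rw [vmin_eq_of_lt nums h]
  · have hlr' : l = r := by omega
    subst hlr'
    simp [vmin_eq_of_not_lt nums (lt_irrefl l)]

lemma aWhile_unfold (nums : List Int) (k : Int) (r start : Nat) (M m : Int)
    (h1 : PySem.List.max? (PySem.List.slice nums (some (start : Int)) (some ((r : Int) + 1))) (fun y => y) = some M)
    (h2 : PySem.List.min? (PySem.List.slice nums (some (start : Int)) (some ((r : Int) + 1))) (fun y => y) = some m) :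
    aWhile nums k r start = if M - m > k then aWhile nums k r (start + 1) else start := by
  rw [aWhile]
  split
  · rename_i M' m' hM hm
    rw [h1] at hM; rw [h2] at hm
    cases hM; cases hm; rfl
  · rename_i hbad
    exact absurd (hbad M m h1 h2) (by simp)

lemma slice_eq_win (nums : List Int) (r start : Nat) :
    PySem.List.slice nums (some (start : Int)) (some ((r : Int) + 1)) =
      (nums.drop start).take (r + 1 - start) := by
  have hc : ((r : Int) + 1) = ((r + 1 : Nat) : Int) := by push_cast; ring
  rw [hc, PySem.List.slice_natCast]

lemma aWhile_eq (nums : List Int) (k : Int) (hk : 0 ≤ k) {r : Nat} (hr : r < nums.length) :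
    ∀ d start : Nat, mL nums k r - start ≤ d → start ≤ mL nums k r →
      aWhile nums k r start = mL nums k r := by
  intro d
  induction d with
  | zero =>
      intro start hd hle
      have hsr : start ≤ r := le_trans hle (mL_le nums k hk r)
      have h1 : PySem.List.max? (PySem.List.slice nums (some (start : Int)) (some ((r : Int) + 1))) (fun y => y) = some (vmax nums start r) := by
        rw [slice_eq_win]; exact max?_win nums hsr hr
      have h2 : PySem.List.min? (PySem.List.slice nums (some (start : Int)) (some ((r : Int) + 1))) (fun y => y) = some (vmin nums start r) := by
        rw [slice_eq_win]; exact min?_win nums hsr hr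
      rw [aWhile_unfold nums k r start _ _ h1 h2]
      split_ifs with hgt
      · exfalso
        have hok := mL_ok nums k hk r
        have heq : start = mL nums k r := by omega
        rw [heq] at hgt; omega
      · exact le_antisymm hle (mL_le_of_ok nums k hsr (by omega))
  | succ d ih =>
      intro start hd hle
      have hsr : start ≤ r := le_trans hle (mL_le nums k hk r)
      have h1 : PySem.List.max? (PySem.List.slice nums (some (start : Int)) (some ((r : Int) + 1))) (fun y => y) = some (vmax nums start r) := by
        rw [slice_eq_win]; exact max?_win nums hsr hr
      have h2 : PySem.List.min? (PySem.List.slice nums (some (start : Int)) (some ((r : Int) + 1))) (fun y => y) = some (vmin nums start r) := by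
        rw [slice_eq_win]; exact min?_win nums hsr hr
      rw [aWhile_unfold nums k r start _ _ h1 h2]
      split_ifs with hgt
      · have hlt : start < mL nums k r := by
          rcases Nat.lt_or_ge start (mL nums k r) with h | h
          · exact h
          · exfalso
            have hok := mL_ok nums k hk r
            have heq : start = mL nums k r := le_antisymm hle h
            rw [← heq] at hok; omega
        exact ih (start + 1) (by omega) (by omega)
      · exact le_antisymm hle (mL_le_of_ok nums k hsr (by omega))

lemma bGrow_eq (nums : List Int) (k : Int) (hk : 0 ≤ k) {r : Nat} (hr : r < nums.length) :
    ∀ l : Nat, mL nums k r ≤ l → l ≤ r →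
      bGrow nums k l (vmax nums l r) (vmin nums l r) = mL nums k r := by
  intro l
  induction l with
  | zero =>
      intro hml _
      simpa [bGrow] using (Nat.le_zero.mp hml).symm
  | succ l ih =>
      intro hml hlr
      have hlt : l < r := by omega
      have hln : l < nums.length := by omega
      have hget : PySem.List.pyGet? nums (l : Int) = some (nums.getD l 0) := by
        rw [PySem.List.pyGet?_natCast, List.getElem?_eq_getElem hln,
            List.getD_eq_getElem nums 0 hln]
      rw [bGrow, hget]
      simp only
      have hnh : (if vmax nums (l + 1) r ≥ nums.getD l 0 then vmax nums (l + 1) r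
          else nums.getD l 0) = vmax nums l r := by
        rw [vmax_eq_of_lt nums hlt]
        split_ifs with h
        · exact (max_eq_right h).symm
        · exact (max_eq_left (by omega)).symm
      have hnl : (if vmin nums (l + 1) r ≤ nums.getD l 0 then vmin nums (l + 1) r
          else nums.getD l 0) = vmin nums l r := by
        rw [vmin_eq_of_lt nums hlt]
        split_ifs with h
        · exact (min_eq_right h).symm
        · exact (min_eq_left (by omega)).symm
      rw [hnh, hnl]
      split_ifs with hgt
      · -- window [l..r] no longer fits: B stops at l+1, which must be mL
        have hge : l + 1 ≤ mL nums k r := by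
          by_contra hcon
          have hml_le : mL nums k r ≤ l := by omega
          have hok := mL_ok nums k hk r
          have ha := vmax_l_anti nums (l - mL nums k r) (mL nums k r) l r (le_refl _) hml_le (by omega)
          have hb := vmin_l_anti nums (l - mL nums k r) (mL nums k r) l r (le_refl _) hml_le (by omega)
          omega
        omega
      · exact ih (mL_le_of_ok nums k (by omega) (by omega)) (by omega)

lemma loop_eq (nums : List Int) (k : Int) (hk : 0 ≤ k) :
    ∀ (c a : Nat), a + c = nums.length → ∀ (left : Nat) (best : Int),
      (a < nums.length → left ≤ mL nums k a) →
      ((List.range' a c).foldl (fun (st : Nat × Int) right =>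
          let lft := aWhile nums k right st.1
          (lft, max st.2 ((right : Int) - (lft : Int) + 1))) (left, best)).2 =
      (List.range' a c).foldl (fun (best : Int) (r : Nat) =>
          match PySem.List.pyGet? nums (r : Int) with
          | some x => max best ((r : Int) - (bGrow nums k r x x : Int) + 1)
          | none => best) best := by
  intro c
  induction c with
  | zero =>
      intro a ha left best h
      simp [List.range']
  | succ c ih =>
      intro a ha left best h
      have han : a < nums.length := by omega
      rw [List.range'_succ]
      simp only [List.foldl_cons]
      have hml := aWhile_eq nums k hk han (mL nums k a - left) left (le_refl _) (h han)
      have hget : PySem.List.pyGet? nums (a : Int) = some (nums.getD a 0) := by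
        rw [PySem.List.pyGet?_natCast, List.getElem?_eq_getElem han,
            List.getD_eq_getElem nums 0 han]
      have hb : bGrow nums k a (nums.getD a 0) (nums.getD a 0) = mL nums k a := by
        have h1 := bGrow_eq nums k hk han a (mL_le nums k hk a) (le_refl a)
        rwa [vmax_eq_of_not_lt nums (lt_irrefl a), vmin_eq_of_not_lt nums (lt_irrefl a)] at h1
      simp only [hml, hget, hb]
      exact ih (a + 1) (by omega) (mL nums k a) _ (fun _ => mL_mono nums k hk a)

-- ===== VERDICT (by name: the statement is the Claim_ definition above) =====
theorem answer_spec : Claim_equal_answer := by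
  intro nums k _hd hpre
  show answer nums k = answer_alt nums k
  rcases hpre with h | hk
  · subst h; rfl
  · unfold answer answer_alt
    rw [List.range_eq_range']
    exact loop_eq nums k hk nums.length 0 (by omega) 0 0 (fun _ => Nat.zero_le _)
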